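-- pv_equiv track=rewrite | github.com/tracysun27/genshin-wishes | genshin_wishes_functions.py | four_star_pity
-- ===== SOURCE A (Python) =====
-- def four_star_pity(user_list):
--     #if there is a 4 (or 5) in the list,
--         #have one pointer at the first 4 in the list,
--         #and count the number of entries until you reach another 4. (reset)
--         #return number of entries after the 4.
--     #else if there is no 4 in the list,
--         #count from beginning of list.
--     user_pity = 0
--     for (index,entry) in enumerate(user_list):
--         if entry == '4' or entry == '5':
--             user_pity = 0
--             continue
--         else:
--             user_pity += 1
--             continue
--     return user_pity
-- ===== SOURCE B (Python) =====
-- def four_star_pity(user_list):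
--     # walk the list from the END and stop at the first '4'/'5' seen;
--     # the pity is the length of the clean suffix.
--     n = 0
--     for e in reversed(user_list):
--         if e == '4' or e == '5':
--             break
--         n += 1
--     return n
-- ===== Notes on version B (the rewrite author's own statement) =====
-- stated objective: alternative
-- what changed: Replaces A's full forward pass with a reset counter by a backward scan that stops (break) at the first '4'/'5' from the end, counting only the clean suffix.
import Mathlib
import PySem

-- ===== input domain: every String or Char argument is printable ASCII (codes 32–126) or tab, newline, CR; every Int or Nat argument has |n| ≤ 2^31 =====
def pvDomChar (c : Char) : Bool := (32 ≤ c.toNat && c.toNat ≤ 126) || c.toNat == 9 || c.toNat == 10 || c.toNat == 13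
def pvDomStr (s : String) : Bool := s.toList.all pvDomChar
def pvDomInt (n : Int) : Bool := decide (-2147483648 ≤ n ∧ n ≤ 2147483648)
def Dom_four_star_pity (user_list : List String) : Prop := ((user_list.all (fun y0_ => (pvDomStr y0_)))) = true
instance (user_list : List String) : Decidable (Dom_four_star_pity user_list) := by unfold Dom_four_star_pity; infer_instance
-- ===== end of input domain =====

-- B scans backward from the end and stops at the first '4'/'5' (early exit), counting the clean
-- suffix; A makes a full forward pass with a counter reset on every '4'/'5'. Same return value.

-- ===== PORT A =====
def four_star_pity (user_list : List String) : Int :=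
  user_list.foldl (fun user_pity entry =>
    if entry == "4" || entry == "5" then 0 else user_pity + 1) 0

-- ===== PORT B =====
-- the `for … in reversed(…)` loop with `break`: structural recursion that stops at the first match
def pvCountUntil45 : List String → Int
  | [] => 0
  | e :: rest => if e == "4" || e == "5" then 0 else pvCountUntil45 rest + 1

def four_star_pity_alt (user_list : List String) : Int :=
  pvCountUntil45 user_list.reverse

-- ===== PRECONDITION & SPEC =====
def Spec_four_star_pity (user_list : List String) (out : Int) : Prop := out = four_star_pity_alt user_list
instance (user_list : List String) (out : Int) : Decidable (Spec_four_star_pity user_list out) := by unfold Spec_four_star_pity; infer_instance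

-- ===== CLAIM =====
def Claim_equal_four_star_pity : Prop := ∀ (user_list : List String), Dom_four_star_pity user_list → Spec_four_star_pity user_list (four_star_pity user_list)

-- ===== LEMMAS AND PROOFS =====
theorem four_star_pity_eq_alt (l : List String) : four_star_pity l = four_star_pity_alt l := by
  induction l using List.reverseRecOn with
  | nil => decide
  | append_singleton xs x ih =>
    simp only [four_star_pity, four_star_pity_alt, List.foldl_append, List.foldl_cons,
      List.foldl_nil, List.reverse_append, List.reverse_cons, List.reverse_nil,
      List.nil_append, List.cons_append, pvCountUntil45] at *
    by_cases h : (x == "4" || x == "5") = true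
    · rw [if_pos h, if_pos h]
    · rw [if_neg h, if_neg h, ih]

-- ===== VERDICT =====
theorem four_star_pity_spec : Claim_equal_four_star_pity := by
  intro l _
  exact four_star_pity_eq_alt l
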